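-- pv_equiv track=rewrite | github.com/utopia-group/TypeT5 | src/typet5/visualization.py | colorize_code_html
-- ===== SOURCE A (Python) =====
-- def colorize_code_html(code: str, comment_color: str = "orange") -> str:
--     "Highlight the special comments in the type checker-augmented python code."
--     output = list[str]()
--     in_comment = False
--     for i in range(len(code)):
--         c = code[i]
--         prev = code[i - 1] if i > 0 else None
--         next = code[i + 1] if i < len(code) - 1 else None
--         if not in_comment and c == "/" and next == "*":
--             output.append(f"<span style='color: {comment_color}'>")
--             in_comment = True
--         output.append(c)
--         if in_comment and prev == "*" and c == "/":
--             output.append("</span>")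
--             in_comment = False
--
--     return "".join(output)
-- ===== SOURCE B (Python) =====
-- def colorize_code_html(code: str, comment_color: str = "orange") -> str:
--     "Highlight the special comments in the type checker-augmented python code."
--     open_tag = f"<span style='color: {comment_color}'>"
--     parts = []
--     pos = 0
--     while True:
--         start = code.find("/*", pos)
--         if start == -1:
--             parts.append(code[pos:])
--             break
--         parts.append(code[pos:start])
--         parts.append(open_tag)
--         end = code.find("*/", start + 1)
--         if end == -1:
--             parts.append(code[start:])
--             break
--         parts.append(code[start:end + 2])
--         parts.append("</span>")
--         pos = end + 2
--     return "".join(parts)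
-- ===== Notes on version B (the rewrite author's own statement) =====
-- stated objective: faster
-- what changed: Replaces A's per-character state machine (in_comment flag plus prev/next lookups at every index) by a position-based scanner that jumps straight between comment delimiters with str.find and copies whole slices, so the per-character Python loop disappears.
-- intended difference: On code where a comment opener outside any comment is immediately preceded by a star character, A closes the highlight span instantly after the opening slash by borrowing that star as the closer, while B colors the whole comment (leaving the span open when the comment is unterminated), which is the intended highlighting. — e.g. on colorize_code_html("*/*", "orange"): A returns "*<span style='color: orange'>/</span>*", B returns "*<span style='color: orange'>/*"
import Mathlib
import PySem

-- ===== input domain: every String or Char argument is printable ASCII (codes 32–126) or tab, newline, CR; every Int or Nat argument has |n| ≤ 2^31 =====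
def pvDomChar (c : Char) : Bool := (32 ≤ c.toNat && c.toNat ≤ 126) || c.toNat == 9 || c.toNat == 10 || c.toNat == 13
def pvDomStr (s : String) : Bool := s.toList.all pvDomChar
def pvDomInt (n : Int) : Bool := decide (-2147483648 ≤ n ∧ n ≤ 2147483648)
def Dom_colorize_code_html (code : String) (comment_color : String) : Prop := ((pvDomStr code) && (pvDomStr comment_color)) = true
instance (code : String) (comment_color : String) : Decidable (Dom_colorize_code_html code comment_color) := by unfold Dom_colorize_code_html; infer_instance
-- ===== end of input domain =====

-- B replaces A's per-character state machine by a str.find/slice scanner over comment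
-- delimiters (measurably faster by a constant factor). Where a comment opener outside
-- a comment is immediately preceded by a star, A closes the span instantly by
-- borrowing that star; B colors the whole comment — an intended difference (D_ below,
-- with witness and a tightness theorem).


-- tags shared by both ports ("</span>" and f"<span style='color: {comment_color}'>")
def pvCloseTag : List Char := "</span>".toList
def pvOpenTag (comment_color : List Char) : List Char :=
  "<span style='color: ".toList ++ comment_color ++ "'>".toList

-- ===== PORT A =====
-- one iteration of A's `for i in range(len(code))` loop; state = (output, in_comment)
def pvStepA (cc cs : List Char) (st : List (List Char) × Bool) (i : Nat) : List (List Char) × Bool :=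
  let c := cs.getD i ' '                                          -- c = code[i] (in range for every loop index)
  let prev := if 0 < i then some (cs.getD (i - 1) ' ') else none  -- code[i-1] if i > 0 else None
  let next := if i < cs.length - 1 then some (cs.getD (i + 1) ' ') else none  -- code[i+1] if i < len-1 else None
  let st1 := if !st.2 && (c == '/') && (next == some '*')
             then (st.1 ++ [pvOpenTag cc], true) else st
  let st2 := (st1.1 ++ [[c]], st1.2)
  if st2.2 && (prev == some '*') && (c == '/')
  then (st2.1 ++ [pvCloseTag], false) else st2

def colorize_code_html (code : String) (comment_color : String) : String :=
  let cs := code.toList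
  let r := (List.range cs.length).foldl (pvStepA comment_color.toList cs) ([], false)
  String.ofList (PySem.Chars.join [] r.1)     -- "".join(output)

-- ===== PORT B =====
-- B's `while True` loop: pos scans `code` from comment opener to comment closer.
-- Fuel only makes the recursion structural; with the fuel B supplies (len+1) the
-- base case is never reached (pos grows by ≥ 1 per iteration).
def pvLoopB (ot cs : List Char) : Nat → Nat → List (List Char)
  | 0, _ => []
  | fuel + 1, pos =>
    let start := PySem.Chars.findFrom cs ['/', '*'] (pos : Int)   -- code.find("/*", pos)
    if start = -1 then
      [PySem.List.slice cs (some (pos : Int)) none]               -- code[pos:]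
    else
      let e := PySem.Chars.findFrom cs ['*', '/'] (start + 1)     -- code.find("*/", start + 1)
      if e = -1 then
        [PySem.List.slice cs (some (pos : Int)) (some start),     -- code[pos:start]
         ot,
         PySem.List.slice cs (some start) none]                   -- code[start:]
      else
        PySem.List.slice cs (some (pos : Int)) (some start) ::
        ot ::
        PySem.List.slice cs (some start) (some (e + 2)) ::        -- code[start:end+2]
        pvCloseTag ::
        pvLoopB ot cs fuel (e.toNat + 2)

def colorize_code_html_alt (code : String) (comment_color : String) : String :=
  let ot := pvOpenTag comment_color.toList
  String.ofList (PySem.Chars.join [] (pvLoopB ot code.toList (code.toList.length + 1) 0))   -- "".join(parts)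

-- ===== PRECONDITION & SPEC =====
-- pvHasQuirk scans the input once (previous character p, "inside a comment" inC) and
-- reports whether some comment opener "/*" outside a comment is immediately preceded
-- by '*': exactly the inputs on which A borrows that '*' as an instant closer.
def pvHasQuirk (p : Option Char) (inC : Bool) : List Char → Bool
  | [] => false
  | c :: rest =>
    if inC then
      pvHasQuirk (some c) (!(p == some '*' && c == '/')) rest
    else if c == '/' && rest.head? == some '*' then
      (p == some '*') || pvHasQuirk (some c) true rest
    else
      pvHasQuirk (some c) false rest

-- On code where a comment opener outside any comment is immediately preceded by a
-- star, A closes the span instantly by borrowing that star (a span around the lone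
-- slash); B colors the whole comment, which is the intended highlighting.
def D_colorize_code_html (code : String) (comment_color : String) : Prop :=
  pvHasQuirk none false code.toList = true
instance (code : String) (comment_color : String) : Decidable (D_colorize_code_html code comment_color) := by unfold D_colorize_code_html; infer_instance

def Spec_colorize_code_html (code : String) (comment_color : String) (out : String) : Prop := ¬ D_colorize_code_html code comment_color → out = colorize_code_html_alt code comment_color
instance (code : String) (comment_color : String) (out : String) : Decidable (Spec_colorize_code_html code comment_color out) := by unfold Spec_colorize_code_html; infer_instance

def pvDiffWitness_colorize_code_html : String × String := ("*/*", "orange")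
def pvDiffWitnessOut_colorize_code_html : String × String :=
  ("*<span style='color: orange'>/</span>*", "*<span style='color: orange'>/*")

-- ===== CLAIM (what is proved, stated in full; the proofs are below) =====
def Claim_unchanged_colorize_code_html : Prop := ∀ (code : String) (comment_color : String), Dom_colorize_code_html code comment_color → Spec_colorize_code_html code comment_color (colorize_code_html code comment_color)
def Claim_changed_colorize_code_html : Prop := Dom_colorize_code_html (pvDiffWitness_colorize_code_html.1) (pvDiffWitness_colorize_code_html.2) ∧ D_colorize_code_html (pvDiffWitness_colorize_code_html.1) (pvDiffWitness_colorize_code_html.2) ∧ colorize_code_html (pvDiffWitness_colorize_code_html.1) (pvDiffWitness_colorize_code_html.2) = pvDiffWitnessOut_colorize_code_html.1 ∧ colorize_code_html_alt (pvDiffWitness_colorize_code_html.1) (pvDiffWitness_colorize_code_html.2) = pvDiffWitnessOut_colorize_code_html.2 ∧ pvDiffWitnessOut_colorize_code_html.1 ≠ pvDiffWitnessOut_colorize_code_html.2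
def Claim_exact_colorize_code_html : Prop := ∀ (code : String) (comment_color : String), Dom_colorize_code_html code comment_color → D_colorize_code_html code comment_color → colorize_code_html code comment_color ≠ colorize_code_html_alt code comment_color

-- ===== LEMMAS AND PROOFS =====

-- "".join = concatenation
theorem pvJoinNil (l : List (List Char)) : PySem.Chars.join [] l = l.flatten := by
  induction l with
  | nil => rfl
  | cons a t ih =>
    cases t with
    | nil => simp [PySem.Chars.join, List.intercalate, List.intersperse]
    | cons b u =>
      simp only [PySem.Chars.join, List.intercalate, List.intersperse] at ih ⊢
      simp only [List.flatten_cons, ih, List.nil_append]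

-- canonical char-by-char result both ports are reduced to
def pvSpec (ot : List Char) (p : Option Char) (inC : Bool) : List Char → List Char
  | [] => []
  | c :: rs =>
    let opened := !inC && (c == '/') && (rs.head? == some '*')
    let inC1 := inC || opened
    let closed := inC1 && (p == some '*') && (c == '/')
    (if opened then ot else []) ++
      c :: ((if closed then pvCloseTag else []) ++ pvSpec ot (some c) (inC1 && !closed) rs)

-- the character A's loop sees as `prev` at index i
def pvPrev (cs : List Char) (i : Nat) : Option Char :=
  if 0 < i then some (cs.getD (i - 1) ' ') else none

-- a two-char prefix of a drop, unpacked
theorem pvPrefix2 {cs : List Char} {m : Nat} {x y : Char} (h : [x, y] <+: cs.drop m) :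
    m + 2 ≤ cs.length ∧ cs.getD m ' ' = x ∧ cs.getD (m + 1) ' ' = y ∧
    cs.drop m = x :: y :: cs.drop (m + 2) := by
  obtain ⟨r, hr⟩ := h
  have hlen : m + 2 ≤ cs.length := by
    have := congrArg List.length hr
    simp [List.length_drop] at this
    omega
  have hd : cs.drop m = x :: y :: cs.drop (m + 2) := by
    have h2 : cs.drop (m + 2) = (cs.drop m).drop 2 := by
      rw [List.drop_drop]
    rw [h2, ← hr]
    simp
  refine ⟨hlen, ?_, ?_, hd⟩
  · have h0 : cs[m]? = some x := by
      have : (cs.drop m)[0]? = some x := by rw [hd]; rfl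
      simpa using this
    simp [List.getD_eq_getElem?_getD, h0]
  · have h1 : cs[m + 1]? = some y := by
      have : (cs.drop m)[1]? = some y := by rw [hd]; rfl
      simpa using this
    simp [List.getD_eq_getElem?_getD, h1]

-- no occurrence from m onwards transfers to any later index
theorem pvNoOcc {cs sub : List Char} {m i : Nat} (h : ¬ sub <:+: cs.drop m) (hmi : m ≤ i) :
    ¬ sub <+: cs.drop i := by
  intro hp
  apply h
  have hdi : cs.drop i = (cs.drop m).drop (i - m) := by
    rw [List.drop_drop]; congr 1; omega
  rw [hdi] at hp
  exact hp.isInfix.trans (List.drop_suffix (i - m) (cs.drop m)).isInfix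

-- A = spec : the index fold from i equals the spec on the suffix
set_option maxHeartbeats 2000000 in
theorem pvA_spec (cc cs : List Char) :
    ∀ k i acc inC, i ≤ cs.length → cs.length - i = k →
    ((List.range' i (cs.length - i)).foldl (pvStepA cc cs) (acc, inC)).1.flatten
      = acc.flatten ++ pvSpec (pvOpenTag cc) (pvPrev cs i) inC (cs.drop i) := by
  intro k
  induction k with
  | zero =>
    intro i acc inC hle hk
    have hi : i = cs.length := by omega
    subst hi
    simp [List.drop_eq_nil_of_le, pvSpec]
  | succ n ih =>
    intro i acc inC hle hk
    have hi : i < cs.length := by omega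
    have hk2 : cs.length - (i + 1) = n := by omega
    have hc : cs.getD i ' ' = cs[i] := by
      simp [List.getD_eq_getElem?_getD, List.getElem?_eq_getElem hi]
    have hdrop : cs.drop i = cs[i] :: cs.drop (i + 1) := List.drop_eq_getElem_cons hi
    have hnext : (if i < cs.length - 1 then some (cs.getD (i + 1) ' ') else none)
        = (cs.drop (i + 1)).head? := by
      rw [List.head?_drop]
      split_ifs with h
      · rw [List.getElem?_eq_getElem (by omega)]
        simp [List.getD_eq_getElem?_getD,
          List.getElem?_eq_getElem (show i + 1 < cs.length by omega)]
      · rw [List.getElem?_eq_none (by omega)]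
    have hp1 : pvPrev cs (i + 1) = some cs[i] := by
      simp [pvPrev, List.getD_eq_getElem?_getD, List.getElem?_eq_getElem hi]
    have hstep : pvStepA cc cs (acc, inC) i =
        (acc ++ (if (!inC && (cs[i] == '/') && ((cs.drop (i + 1)).head? == some '*'))
                 then [pvOpenTag cc] else [])
             ++ [[cs[i]]]
             ++ (if ((inC || (!inC && (cs[i] == '/') && ((cs.drop (i + 1)).head? == some '*')))
                      && (pvPrev cs i == some '*') && (cs[i] == '/'))
                 then [pvCloseTag] else []),
         (inC || (!inC && (cs[i] == '/') && ((cs.drop (i + 1)).head? == some '*')))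
           && !((inC || (!inC && (cs[i] == '/') && ((cs.drop (i + 1)).head? == some '*')))
                 && (pvPrev cs i == some '*') && (cs[i] == '/'))) := by
      dsimp only [pvStepA, pvPrev]
      rw [hc, hnext]
      rcases Bool.eq_false_or_eq_true (cs[i] == '/') with hA | hA <;>
      rcases Bool.eq_false_or_eq_true ((cs.drop (i + 1)).head? == some '*') with hB | hB <;>
      rcases Bool.eq_false_or_eq_true
        ((if 0 < i then some (cs.getD (i - 1) ' ') else none) == some '*') with hP | hP <;>
      cases inC <;>
      simp only [hA, hB, hP, Bool.true_and, Bool.false_and, Bool.and_true, Bool.and_false,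
        Bool.or_true, Bool.or_false, Bool.true_or, Bool.false_or, Bool.not_true, Bool.not_false,
        Bool.false_eq_true, eq_self_iff_true, if_true, if_false, List.append_nil]
    rw [hk, List.range'_succ, List.foldl_cons, ← hk2, hstep,
      ih (i + 1) _ _ (by omega) hk2, hdrop]
    simp only [pvSpec, hp1]
    simp [List.flatten_append, apply_ite List.flatten, List.append_assoc]

-- spec skips occurrence-free stretches outside comments
theorem pvSkip (ot cs : List Char) :
    ∀ s pos, pos + s ≤ cs.length → (∀ i, pos ≤ i → i < pos + s → ¬ ['/', '*'] <+: cs.drop i) →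
    pvSpec ot (pvPrev cs pos) false (cs.drop pos)
      = (cs.drop pos).take s ++ pvSpec ot (pvPrev cs (pos + s)) false (cs.drop (pos + s)) := by
  intro s
  induction s with
  | zero => intro pos _ _; simp
  | succ n ih =>
    intro pos hlen hmin
    have hi : pos < cs.length := by omega
    have hdrop : cs.drop pos = cs[pos] :: cs.drop (pos + 1) := List.drop_eq_getElem_cons hi
    have hop : ((cs[pos] == '/') && ((cs.drop (pos + 1)).head? == some '*')) = false := by
      by_contra hc
      simp only [Bool.not_eq_false, Bool.and_eq_true, beq_iff_eq] at hc
      obtain ⟨hc1, hc2⟩ := hc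
      apply hmin pos le_rfl (by omega)
      rw [List.head?_drop] at hc2
      have h2 : pos + 1 < cs.length := by
        by_contra hn
        rw [List.getElem?_eq_none (by omega)] at hc2
        simp at hc2
      rw [List.getElem?_eq_getElem h2] at hc2
      refine ⟨cs.drop (pos + 2), ?_⟩
      rw [hdrop, List.drop_eq_getElem_cons h2, hc1, Option.some.inj hc2]
      rfl
    rw [hdrop]
    simp only [pvSpec, Bool.not_false, Bool.true_and, hop, Bool.false_and,
      if_neg (Bool.false_ne_true), Bool.or_false, Bool.not_false, List.nil_append]
    have hp1 : pvPrev cs (pos + 1) = some cs[pos] := by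
      simp [pvPrev, List.getD_eq_getElem?_getD, List.getElem?_eq_getElem hi]
    rw [← hp1, ih (pos + 1) (by omega) (fun i h1 h2 => hmin i (by omega) (by omega))]
    simp only [List.take_succ_cons, List.cons_append,
      show pos + 1 + n = pos + (n + 1) from by omega]

-- spec inside a comment, no closing "*/" in the window (a :: l)
theorem pvInNone (ot : List Char) :
    ∀ (l : List Char) (a : Char), ¬ ['*', '/'] <:+: (a :: l) →
    pvSpec ot (some a) true l = l := by
  intro l
  induction l with
  | nil => intro a _; rfl
  | cons c rs ih =>
    intro a h
    have hcl : ((some a == some '*') && (c == '/')) = false := by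
      by_contra hc
      simp only [Bool.not_eq_false, Bool.and_eq_true, beq_iff_eq, Option.some.injEq] at hc
      obtain ⟨h1, h2⟩ := hc
      subst h1; subst h2
      have hpre : ['*', '/'] <+: '*' :: '/' :: rs := ⟨rs, rfl⟩
      exact h hpre.isInfix
    simp only [pvSpec, Bool.not_true, Bool.false_and, if_neg (Bool.false_ne_true),
      Bool.true_or, Bool.or_true, Bool.true_and, hcl, Bool.and_false, Bool.false_and,
      Bool.not_false, Bool.and_true, List.nil_append]
    have := ih c (fun hi => h (hi.trans (List.suffix_cons a (c :: rs)).isInfix))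
    rw [this]

-- spec inside a comment, first "*/" of the window (a :: l) at index e
theorem pvInClose (ot : List Char) :
    ∀ (e : Nat) (l : List Char) (a : Char),
    ['*', '/'] <+: (a :: l).drop e → (∀ j, j < e → ¬ ['*', '/'] <+: (a :: l).drop j) →
    pvSpec ot (some a) true l
      = l.take (e + 1) ++ pvCloseTag ++ pvSpec ot (some '/') false (l.drop (e + 1)) := by
  intro e
  induction e with
  | zero =>
    intro l a hp _
    obtain ⟨r, hr⟩ := hp
    simp only [List.drop_zero] at hr
    obtain ⟨ha, hl⟩ : a = '*' ∧ l = '/' :: r := by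
      cases hr; exact ⟨rfl, rfl⟩
    subst ha; subst hl
    simp [pvSpec]
  | succ n ih =>
    intro l a hp hmin
    cases l with
    | nil =>
      exfalso
      have : ((a :: ([] : List Char)).drop (n + 1)) = [] := by
        cases n <;> rfl
      rw [this] at hp
      obtain ⟨r, hr⟩ := hp
      simp at hr
    | cons c rs =>
      have hcl : ((some a == some '*') && (c == '/')) = false := by
        by_contra hc
        simp only [Bool.not_eq_false, Bool.and_eq_true, beq_iff_eq, Option.some.injEq] at hc
        obtain ⟨h1, h2⟩ := hc
        subst h1; subst h2
        exact hmin 0 (by omega) ⟨rs, rfl⟩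
      simp only [pvSpec, Bool.not_true, Bool.false_and, if_neg (Bool.false_ne_true),
        Bool.true_or, Bool.or_true, Bool.true_and, hcl, Bool.and_false, Bool.false_and,
        Bool.not_false, Bool.and_true, List.nil_append]
      rw [ih rs c hp (fun j hj => hmin (j + 1) (by omega))]
      simp [List.take_succ_cons]

-- quirk scan over an opener-free stretch outside comments
theorem pvQuirkSkip (cs : List Char) :
    ∀ s pos, pos + s ≤ cs.length → (∀ i, pos ≤ i → i < pos + s → ¬ ['/', '*'] <+: cs.drop i) →
    pvHasQuirk (pvPrev cs pos) false (cs.drop pos)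
      = pvHasQuirk (pvPrev cs (pos + s)) false (cs.drop (pos + s)) := by
  intro s
  induction s with
  | zero => intro pos _ _; simp
  | succ n ih =>
    intro pos hlen hmin
    have hi : pos < cs.length := by omega
    have hdrop : cs.drop pos = cs[pos] :: cs.drop (pos + 1) := List.drop_eq_getElem_cons hi
    have hop : ((cs[pos] == '/') && ((cs.drop (pos + 1)).head? == some '*')) = false := by
      by_contra hc
      simp only [Bool.not_eq_false, Bool.and_eq_true, beq_iff_eq] at hc
      obtain ⟨hc1, hc2⟩ := hc
      apply hmin pos le_rfl (by omega)
      rw [List.head?_drop] at hc2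
      have h2 : pos + 1 < cs.length := by
        by_contra hn
        rw [List.getElem?_eq_none (by omega)] at hc2
        simp at hc2
      rw [List.getElem?_eq_getElem h2] at hc2
      refine ⟨cs.drop (pos + 2), ?_⟩
      rw [hdrop, List.drop_eq_getElem_cons h2, hc1, Option.some.inj hc2]
      rfl
    rw [hdrop]
    simp only [pvHasQuirk, hop, Bool.false_eq_true, if_false, if_neg]
    have hp1 : pvPrev cs (pos + 1) = some cs[pos] := by
      simp [pvPrev, List.getD_eq_getElem?_getD, List.getElem?_eq_getElem hi]
    rw [← hp1, ih (pos + 1) (by omega) (fun i h1 h2 => hmin i (by omega) (by omega))]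
    simp only [show pos + 1 + n = pos + (n + 1) from by omega]

-- quirk scan inside a comment, no closing "*/" in the window (a :: l)
theorem pvQuirkInNone :
    ∀ (l : List Char) (a : Char), ¬ ['*', '/'] <:+: (a :: l) →
    pvHasQuirk (some a) true l = false := by
  intro l
  induction l with
  | nil => intro a _; rfl
  | cons c rs ih =>
    intro a h
    have hcl : ((some a == some '*') && (c == '/')) = false := by
      by_contra hc
      simp only [Bool.not_eq_false, Bool.and_eq_true, beq_iff_eq, Option.some.injEq] at hc
      obtain ⟨h1, h2⟩ := hc
      subst h1; subst h2
      have hpre : ['*', '/'] <+: '*' :: '/' :: rs := ⟨rs, rfl⟩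
      exact h hpre.isInfix
    simp only [pvHasQuirk, if_pos trivial, hcl, Bool.not_false, if_true]
    exact ih c (fun hi => h (hi.trans (List.suffix_cons a (c :: rs)).isInfix))

-- quirk scan inside a comment, first "*/" of the window (a :: l) at index e
theorem pvQuirkClose :
    ∀ (e : Nat) (l : List Char) (a : Char),
    ['*', '/'] <+: (a :: l).drop e → (∀ j, j < e → ¬ ['*', '/'] <+: (a :: l).drop j) →
    pvHasQuirk (some a) true l = pvHasQuirk (some '/') false (l.drop (e + 1)) := by
  intro e
  induction e with
  | zero =>
    intro l a hp _
    obtain ⟨r, hr⟩ := hp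
    simp only [List.drop_zero] at hr
    obtain ⟨ha, hl⟩ : a = '*' ∧ l = '/' :: r := by
      cases hr; exact ⟨rfl, rfl⟩
    subst ha; subst hl
    simp [pvHasQuirk]
  | succ n ih =>
    intro l a hp hmin
    cases l with
    | nil =>
      exfalso
      have : ((a :: ([] : List Char)).drop (n + 1)) = [] := by
        cases n <;> rfl
      rw [this] at hp
      obtain ⟨r, hr⟩ := hp
      simp at hr
    | cons c rs =>
      have hcl : ((some a == some '*') && (c == '/')) = false := by
        by_contra hc
        simp only [Bool.not_eq_false, Bool.and_eq_true, beq_iff_eq, Option.some.injEq] at hc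
        obtain ⟨h1, h2⟩ := hc
        subst h1; subst h2
        exact hmin 0 (by omega) ⟨rs, rfl⟩
      simp only [pvHasQuirk, if_pos trivial, hcl, Bool.not_false, if_true]
      rw [ih rs c hp (fun j hj => hmin (j + 1) (by omega))]
      rfl

-- B = spec on inputs on which A's quirk never fires
theorem pvB_spec (ot cs : List Char) :
    ∀ fuel pos, pos ≤ cs.length → cs.length - pos < fuel →
    pvHasQuirk (pvPrev cs pos) false (cs.drop pos) = false →
    (pvLoopB ot cs fuel pos).flatten = pvSpec ot (pvPrev cs pos) false (cs.drop pos) := by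
  intro fuel
  induction fuel with
  | zero => intro pos _ h _; omega
  | succ n ih =>
  intro pos hpos hfuel hq
  rw [pvLoopB]
  by_cases hs : PySem.Chars.findFrom cs ['/', '*'] (pos : Int) = -1
  · -- no comment opener from pos on: B emits code[pos:], spec copies everything
    simp only [hs, if_pos, reduceIte, List.flatten_cons, List.flatten_nil, List.append_nil,
      PySem.List.slice_from_natCast]
    have hno : ¬ (['/', '*'] <:+: cs.drop pos) :=
      (PySem.Chars.findFrom_natCast_eq_neg_one_iff cs ['/', '*'] pos hpos).mp hs
    rw [pvSkip ot cs (cs.length - pos) pos (by omega) (fun i h1 h2 => pvNoOcc hno h1),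
      show pos + (cs.length - pos) = cs.length by omega,
      List.drop_eq_nil_of_le le_rfl]
    simp only [pvSpec, List.append_nil]
    rw [List.take_of_length_le (by simp)]
  · obtain ⟨hps, hpre, hmin⟩ := PySem.Chars.findFrom_natCast_spec cs ['/', '*'] pos hpos hs
    set st := PySem.Chars.findFrom cs ['/', '*'] (pos : Int) with hstdef
    have hstnn : 0 ≤ st := le_trans (Int.natCast_nonneg pos) hps
    set s' := st.toNat with hs'def
    have hstcast : st = (s' : Int) := by omega
    have hpos' : pos ≤ s' := by omega
    obtain ⟨hl2, hg0, hg1, hdrops⟩ := pvPrefix2 hpre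
    have hd2 : cs.drop (s' + 1) = '*' :: cs.drop (s' + 2) := by
      have h := congrArg List.tail hdrops
      rw [List.tail_drop] at h
      simpa using h
    have hd1 : cs.drop s' = '/' :: cs.drop (s' + 1) := by rw [hdrops, hd2]
    have hskip := pvSkip ot cs (s' - pos) pos (by omega) (fun i h1 h2 => hmin i h1 (by omega))
    rw [show pos + (s' - pos) = s' by omega] at hskip
    have hk' : st + 1 = ((s' + 1 : Nat) : Int) := by omega
    have hqs : pvHasQuirk (pvPrev cs s') false (cs.drop s') = false := by
      have hqq := pvQuirkSkip cs (s' - pos) pos (by omega) (fun i h1 h2 => hmin i h1 (by omega))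
      rw [show pos + (s' - pos) = s' by omega] at hqq
      rw [← hqq]
      exact hq
    have hh1 : (cs.drop (s' + 1)).head? = some '*' := by rw [hd2]; rfl
    have hnocl : (pvPrev cs s' == some '*') = false := by
      by_contra hcc
      simp only [Bool.not_eq_false] at hcc
      rw [hd1] at hqs
      simp [pvHasQuirk, hh1, hcc] at hqs
    have hqopen : pvHasQuirk (some '/') true (cs.drop (s' + 1)) = false := by
      rw [hd1] at hqs
      simpa [pvHasQuirk, hh1, hnocl] using hqs
    -- one spec step at the opener
    have hspec1 : pvSpec ot (pvPrev cs s') false (cs.drop s')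
        = ot ++ '/' :: pvSpec ot (some '/') true (cs.drop (s' + 1)) := by
      rw [hd1]
      simp [pvSpec, hd2, hnocl]
    rw [hskip, hspec1]
    simp only [← hstdef]
    rw [if_neg hs]
    simp only [hk']
    simp only [hstcast]
    by_cases he : PySem.Chars.findFrom cs ['*', '/'] ((s' + 1 : Nat) : Int) = -1
    · -- opener but no closer: unterminated comment, span left open
      simp only [if_pos he, List.flatten_cons, List.flatten_nil, List.append_nil,
        PySem.List.slice_from_natCast, PySem.List.slice_natCast]
      have hno2 : ¬ (['*', '/'] <:+: cs.drop (s' + 1)) :=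
        (PySem.Chars.findFrom_natCast_eq_neg_one_iff cs ['*', '/'] (s' + 1) (by omega)).mp he
      have hnoC : ¬ (['*', '/'] <:+: cs.drop s') := by
        intro hi
        rw [hd1] at hi
        rcases List.infix_cons_iff.mp hi with hp | hi2
        · obtain ⟨r, hr⟩ := hp
          simp at hr
        · exact hno2 hi2
      rw [pvInNone ot (cs.drop (s' + 1)) '/' (by rw [← hd1]; exact hnoC)]
      rw [hd1]
    · -- closer found (strictly after the opener's '/')
      obtain ⟨hke, hepre, hemin⟩ :=
        PySem.Chars.findFrom_natCast_spec cs ['*', '/'] (s' + 1) (by omega) he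
      have henn : 0 ≤ PySem.Chars.findFrom cs ['*', '/'] ((s' + 1 : Nat) : Int) :=
        le_trans (Int.natCast_nonneg _) hke
      simp only [if_neg he, List.flatten_cons, PySem.List.slice_natCast]
      set e' := (PySem.Chars.findFrom cs ['*', '/'] ((s' + 1 : Nat) : Int)).toNat with he'def
      have hecast : PySem.Chars.findFrom cs ['*', '/'] ((s' + 1 : Nat) : Int) = (e' : Int) := by
        omega
      have hs1e : s' + 1 ≤ e' := by omega
      obtain ⟨hel2, heg0, heg1, hedrops⟩ := pvPrefix2 hepre
      have hprev2 : pvPrev cs (e' + 2) = some '/' := by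
        simp only [pvPrev, if_pos (by omega : 0 < e' + 2)]
        rw [show e' + 2 - 1 = e' + 1 by omega, heg1]
      have hdd : (cs.drop (s' + 1)).drop (e' - s' + 1) = cs.drop (e' + 2) := by
        rw [List.drop_drop]; congr 1; omega
      have hwin : ((cs.drop s').drop (e' - s')) = cs.drop e' := by
        rw [List.drop_drop]; congr 1; omega
      have hmine : (∀ j, j < e' - s' → ¬ ['*', '/'] <+: (('/' :: cs.drop (s' + 1)).drop j)) :=
        (fun j hj => by
          rw [← hd1, show (cs.drop s').drop j = cs.drop (s' + j) from by rw [List.drop_drop]]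
          rcases Nat.eq_zero_or_pos j with h0 | h0
          · subst h0
            intro hp
            obtain ⟨r, hr⟩ := hp
            rw [Nat.add_zero, hdrops] at hr
            simp at hr
          · exact hemin (s' + j) (by omega) (by omega))
      have hpree : ['*', '/'] <+: ('/' :: cs.drop (s' + 1)).drop (e' - s') := by
        rw [← hd1, hwin]; exact hepre
      have hq2 : pvHasQuirk (pvPrev cs (e' + 2)) false (cs.drop (e' + 2)) = false := by
        rw [hprev2, ← hdd, ← pvQuirkClose (e' - s') (cs.drop (s' + 1)) '/' hpree hmine]
        exact hqopen
      have hrec := ih (e' + 2) (by omega) (by omega) hq2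
      rw [hrec, hprev2, hecast,
        show ((e' : Int) + 2) = ((e' + 2 : Nat) : Int) by push_cast; ring,
        PySem.List.slice_natCast]
      have hclose := pvInClose ot (e' - s') (cs.drop (s' + 1)) '/' hpree hmine
      rw [hclose]
      rw [hdd, hd1, show e' + 2 - s' = (e' + 1 - s') + 1 by omega, List.take_succ_cons,
        show e' + 1 - s' = e' - s' + 1 by omega]
      simp [List.append_assoc]

-- wherever A's quirk fires, the two outputs differ
theorem pvDiffer (ot cs : List Char) :
    ∀ fuel pos, pos ≤ cs.length → cs.length - pos < fuel →
    pvHasQuirk (pvPrev cs pos) false (cs.drop pos) = true →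
    pvSpec ot (pvPrev cs pos) false (cs.drop pos) ≠ (pvLoopB ot cs fuel pos).flatten := by
  intro fuel
  induction fuel with
  | zero => intro pos _ h _; omega
  | succ n ih =>
  intro pos hpos hfuel hq
  rw [pvLoopB]
  by_cases hs : PySem.Chars.findFrom cs ['/', '*'] (pos : Int) = -1
  · -- no opener at all: the quirk cannot fire, contradiction
    exfalso
    have hno : ¬ (['/', '*'] <:+: cs.drop pos) :=
      (PySem.Chars.findFrom_natCast_eq_neg_one_iff cs ['/', '*'] pos hpos).mp hs
    have hqq := pvQuirkSkip cs (cs.length - pos) pos (by omega) (fun i h1 h2 => pvNoOcc hno h1)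
    rw [show pos + (cs.length - pos) = cs.length by omega,
      List.drop_eq_nil_of_le le_rfl] at hqq
    rw [hqq] at hq
    simp [pvHasQuirk] at hq
  · obtain ⟨hps, hpre, hmin⟩ := PySem.Chars.findFrom_natCast_spec cs ['/', '*'] pos hpos hs
    set st := PySem.Chars.findFrom cs ['/', '*'] (pos : Int) with hstdef
    have hstnn : 0 ≤ st := le_trans (Int.natCast_nonneg pos) hps
    set s' := st.toNat with hs'def
    have hstcast : st = (s' : Int) := by omega
    have hpos' : pos ≤ s' := by omega
    obtain ⟨hl2, hg0, hg1, hdrops⟩ := pvPrefix2 hpre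
    have hd2 : cs.drop (s' + 1) = '*' :: cs.drop (s' + 2) := by
      have h := congrArg List.tail hdrops
      rw [List.tail_drop] at h
      simpa using h
    have hd1 : cs.drop s' = '/' :: cs.drop (s' + 1) := by rw [hdrops, hd2]
    have hskip := pvSkip ot cs (s' - pos) pos (by omega) (fun i h1 h2 => hmin i h1 (by omega))
    rw [show pos + (s' - pos) = s' by omega] at hskip
    have hk' : st + 1 = ((s' + 1 : Nat) : Int) := by omega
    have hqs : pvHasQuirk (pvPrev cs s') false (cs.drop s') = true := by
      have hqq := pvQuirkSkip cs (s' - pos) pos (by omega) (fun i h1 h2 => hmin i h1 (by omega))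
      rw [show pos + (s' - pos) = s' by omega] at hqq
      rw [← hqq]
      exact hq
    have hh1 : (cs.drop (s' + 1)).head? = some '*' := by rw [hd2]; rfl
    have hct : pvCloseTag = '<' :: "/span>".toList := by decide
    rw [hskip]
    simp only [← hstdef]
    rw [if_neg hs]
    simp only [hk']
    simp only [hstcast]
    by_cases hcc : (pvPrev cs s' == some '*') = true
    · -- the quirk fires at this opener: A emits "</span>" right after the '/', B keeps the comment open
      have hspecQ : pvSpec ot (pvPrev cs s') false (cs.drop s')
          = ot ++ '/' :: (pvCloseTag ++ pvSpec ot (some '/') false (cs.drop (s' + 1))) := by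
        rw [hd1]
        simp [pvSpec, hd2, hcc]
      rw [hspecQ]
      by_cases he : PySem.Chars.findFrom cs ['*', '/'] ((s' + 1 : Nat) : Int) = -1
      · simp only [if_pos he, List.flatten_cons, List.flatten_nil, List.append_nil,
          PySem.List.slice_from_natCast, PySem.List.slice_natCast]
        rw [hd1, hd2]
        intro h
        have h1 := List.append_cancel_left h
        have h2 := List.append_cancel_left h1
        have h3 := (List.cons_eq_cons.mp h2).2
        rw [hct] at h3
        exact absurd (List.cons_eq_cons.mp h3).1 (by decide)
      · obtain ⟨hke, hepre, hemin⟩ :=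
          PySem.Chars.findFrom_natCast_spec cs ['*', '/'] (s' + 1) (by omega) he
        have henn : 0 ≤ PySem.Chars.findFrom cs ['*', '/'] ((s' + 1 : Nat) : Int) :=
          le_trans (Int.natCast_nonneg _) hke
        simp only [if_neg he, List.flatten_cons, PySem.List.slice_natCast]
        set e' := (PySem.Chars.findFrom cs ['*', '/'] ((s' + 1 : Nat) : Int)).toNat with he'def
        have hecast : PySem.Chars.findFrom cs ['*', '/'] ((s' + 1 : Nat) : Int) = (e' : Int) := by
          omega
        have hs1e : s' + 1 ≤ e' := by omega
        rw [hecast, show ((e' : Int) + 2) = ((e' + 2 : Nat) : Int) by push_cast; ring,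
          PySem.List.slice_natCast,
          hd1, show e' + 2 - s' = (e' - s' + 1) + 1 by omega, List.take_succ_cons,
          hd2, show e' - s' + 1 = (e' - s') + 1 by omega, List.take_succ_cons]
        intro h
        simp only [List.append_assoc, List.cons_append] at h
        have h1 := List.append_cancel_left h
        have h2 := List.append_cancel_left h1
        have h3 := (List.cons_eq_cons.mp h2).2
        rw [hct] at h3
        exact absurd (List.cons_eq_cons.mp h3).1 (by decide)
    · -- no quirk at this opener: both sides agree on the whole comment, recurse
      have hnocl : (pvPrev cs s' == some '*') = false := by
        revert hcc
        cases pvPrev cs s' == some '*' <;> simp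
      have hqopen : pvHasQuirk (some '/') true (cs.drop (s' + 1)) = true := by
        rw [hd1] at hqs
        simpa [pvHasQuirk, hh1, hnocl] using hqs
      have hspec1 : pvSpec ot (pvPrev cs s') false (cs.drop s')
          = ot ++ '/' :: pvSpec ot (some '/') true (cs.drop (s' + 1)) := by
        rw [hd1]
        simp [pvSpec, hd2, hnocl]
      rw [hspec1]
      by_cases he : PySem.Chars.findFrom cs ['*', '/'] ((s' + 1 : Nat) : Int) = -1
      · -- unterminated comment: the quirk cannot fire inside it, contradiction
        exfalso
        have hno2 : ¬ (['*', '/'] <:+: cs.drop (s' + 1)) :=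
          (PySem.Chars.findFrom_natCast_eq_neg_one_iff cs ['*', '/'] (s' + 1) (by omega)).mp he
        have hnoC : ¬ (['*', '/'] <:+: cs.drop s') := by
          intro hi
          rw [hd1] at hi
          rcases List.infix_cons_iff.mp hi with hp | hi2
          · obtain ⟨r, hr⟩ := hp
            simp at hr
          · exact hno2 hi2
        rw [pvQuirkInNone (cs.drop (s' + 1)) '/' (by rw [← hd1]; exact hnoC)] at hqopen
        exact absurd hqopen (by decide)
      · obtain ⟨hke, hepre, hemin⟩ :=
          PySem.Chars.findFrom_natCast_spec cs ['*', '/'] (s' + 1) (by omega) he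
        have henn : 0 ≤ PySem.Chars.findFrom cs ['*', '/'] ((s' + 1 : Nat) : Int) :=
          le_trans (Int.natCast_nonneg _) hke
        simp only [if_neg he, List.flatten_cons, PySem.List.slice_natCast]
        set e' := (PySem.Chars.findFrom cs ['*', '/'] ((s' + 1 : Nat) : Int)).toNat with he'def
        have hecast : PySem.Chars.findFrom cs ['*', '/'] ((s' + 1 : Nat) : Int) = (e' : Int) := by
          omega
        have hs1e : s' + 1 ≤ e' := by omega
        obtain ⟨hel2, heg0, heg1, hedrops⟩ := pvPrefix2 hepre
        have hprev2 : pvPrev cs (e' + 2) = some '/' := by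
          simp only [pvPrev, if_pos (by omega : 0 < e' + 2)]
          rw [show e' + 2 - 1 = e' + 1 by omega, heg1]
        have hdd : (cs.drop (s' + 1)).drop (e' - s' + 1) = cs.drop (e' + 2) := by
          rw [List.drop_drop]; congr 1; omega
        have hwin : ((cs.drop s').drop (e' - s')) = cs.drop e' := by
          rw [List.drop_drop]; congr 1; omega
        have hmine : (∀ j, j < e' - s' → ¬ ['*', '/'] <+: (('/' :: cs.drop (s' + 1)).drop j)) :=
          (fun j hj => by
            rw [← hd1, show (cs.drop s').drop j = cs.drop (s' + j) from by rw [List.drop_drop]]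
            rcases Nat.eq_zero_or_pos j with h0 | h0
            · subst h0
              intro hp
              obtain ⟨r, hr⟩ := hp
              rw [Nat.add_zero, hdrops] at hr
              simp at hr
            · exact hemin (s' + j) (by omega) (by omega))
        have hpree : ['*', '/'] <+: ('/' :: cs.drop (s' + 1)).drop (e' - s') := by
          rw [← hd1, hwin]; exact hepre
        have hq2 : pvHasQuirk (pvPrev cs (e' + 2)) false (cs.drop (e' + 2)) = true := by
          rw [hprev2, ← hdd, ← pvQuirkClose (e' - s') (cs.drop (s' + 1)) '/' hpree hmine]
          exact hqopen
        have hrecNe := ih (e' + 2) (by omega) (by omega) hq2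
        have hclose := pvInClose ot (e' - s') (cs.drop (s' + 1)) '/' hpree hmine
        rw [hprev2] at hrecNe
        rw [hclose, hdd, hecast,
          show ((e' : Int) + 2) = ((e' + 2 : Nat) : Int) by push_cast; ring,
          PySem.List.slice_natCast,
          hd1, show e' + 2 - s' = (e' + 1 - s') + 1 by omega, List.take_succ_cons,
          show e' + 1 - s' = e' - s' + 1 by omega]
        intro h
        simp only [List.append_assoc, List.cons_append] at h
        have h1 := List.append_cancel_left h
        have h2 := List.append_cancel_left h1
        have h3 := (List.cons_eq_cons.mp h2).2
        have h4 := List.append_cancel_left h3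
        have h5 := List.append_cancel_left h4
        exact hrecNe h5

-- ===== VERDICT (by name: the statements are the Claim_ definitions above) =====
theorem colorize_code_html_spec : Claim_unchanged_colorize_code_html := by
  intro code comment_color _
  unfold Spec_colorize_code_html
  intro hnd
  unfold D_colorize_code_html at hnd
  unfold colorize_code_html colorize_code_html_alt
  have hA := pvA_spec comment_color.toList code.toList (code.toList.length) 0 [] false
    (Nat.zero_le _) rfl
  have hq0 : pvHasQuirk (pvPrev code.toList 0) false (code.toList.drop 0) = false := by
    simpa [pvPrev] using hnd
  have hB := pvB_spec (pvOpenTag comment_color.toList) code.toList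
    (code.toList.length + 1) 0 (Nat.zero_le _) (by omega) hq0
  simp only [List.range_eq_range', Nat.sub_zero] at hA ⊢
  simp only [pvJoinNil]
  rw [hA, hB]
  simp [pvPrev]

theorem colorize_code_html_changed : Claim_changed_colorize_code_html := by
  unfold Claim_changed_colorize_code_html; decide

theorem colorize_code_html_tight : Claim_exact_colorize_code_html := by
  intro code comment_color _ hd
  unfold D_colorize_code_html at hd
  unfold colorize_code_html colorize_code_html_alt
  intro h
  have hq0 : pvHasQuirk (pvPrev code.toList 0) false (code.toList.drop 0) = true := by
    simpa [pvPrev] using hd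
  have hne := pvDiffer (pvOpenTag comment_color.toList) code.toList
    (code.toList.length + 1) 0 (Nat.zero_le _) (by omega) hq0
  apply hne
  have h' := congrArg String.toList h
  simp only [List.range_eq_range'] at h'
  rw [pvJoinNil, pvJoinNil] at h'
  have hA := pvA_spec comment_color.toList code.toList (code.toList.length) 0 [] false
    (Nat.zero_le _) rfl
  simp only [List.range_eq_range', Nat.sub_zero] at hA
  rw [hA] at h'
  simpa [pvPrev] using h'
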